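-- pv_equiv track=rewrite | github.com/gd-hyperdash/SDK | tools/gen_headers.py | remove_ns
-- ===== SOURCE A (Python) =====
-- def remove_ns(class_name: str):
--     tokens = class_name.split('::')
--     if len(tokens) > 1:
--         s = "/* "
--         for i in range(len(tokens) - 1):
--             s += tokens[i] + "::"
--         s += " */ " + tokens[len(tokens) - 1]
--         return s
--     return class_name
-- ===== SOURCE B (Python) =====
-- def remove_ns(class_name: str):
--     i = class_name.find('::')
--     if i == -1:
--         return class_name
--     cut = 0
--     while i != -1:
--         cut = i + 2
--         i = class_name.find('::', cut)
--     return "/* " + class_name[:cut] + " */ " + class_name[cut:]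
-- ===== Notes on version B (the rewrite author's own statement) =====
-- stated objective: alternative
-- what changed: B never builds the token list: it walks the '::' occurrences left-to-right with str.find to locate the greedy cut point, then emits the result with two slices instead of re-concatenating every token in a loop.
import Mathlib
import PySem

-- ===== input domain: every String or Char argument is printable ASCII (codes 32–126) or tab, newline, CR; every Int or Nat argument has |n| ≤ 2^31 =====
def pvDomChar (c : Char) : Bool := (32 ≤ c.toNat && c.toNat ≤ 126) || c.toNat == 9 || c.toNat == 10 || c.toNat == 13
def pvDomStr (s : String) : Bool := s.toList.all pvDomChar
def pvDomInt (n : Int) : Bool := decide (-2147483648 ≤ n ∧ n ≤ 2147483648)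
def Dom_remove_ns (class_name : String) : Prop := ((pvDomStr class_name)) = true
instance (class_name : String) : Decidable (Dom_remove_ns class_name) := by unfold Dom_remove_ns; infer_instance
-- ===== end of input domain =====

-- B locates the greedy cut point by walking the '::' occurrences with str.find and emits two slices,
-- instead of A's split into a token list and re-concatenation loop. Alternative decomposition, same cost.

-- ===== PORT A =====
-- tokens = class_name.split('::'); if len(tokens) > 1: rebuild the prefix tokens with '::' in a loop
def remove_ns (class_name : String) : String :=
  let tokens := PySem.Chars.splitOn class_name.toList [':', ':']
  if 1 < tokens.length then
    let s0 := "/* ".toList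
    let s1 := (PySem.List.pyRange 0 ((tokens.length : Int) - 1) 1).foldl
      (fun acc i => acc ++ PySem.List.pyGetD tokens i [] ++ [':', ':']) s0
    let s2 := s1 ++ " */ ".toList ++ PySem.List.pyGetD tokens ((tokens.length : Int) - 1) []
    String.ofList s2
  else class_name

-- ===== PORT B =====
-- the while loop 'while i != -1: cut = i + 2; i = class_name.find("::", cut)';
-- the fuel (length+1) only makes the recursion total: each step moves cut forward by at least 2
def removeNsGo (t : List Char) : Nat → Int → Int → Int
  | 0, _, cut => cut
  | fuel + 1, i, cut =>
    if i = -1 then cut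
    else removeNsGo t fuel (PySem.Chars.findFrom t [':', ':'] (i + 2) none) (i + 2)

def remove_ns_alt (class_name : String) : String :=
  let t := class_name.toList
  let i := PySem.Chars.find t [':', ':']
  if i = -1 then class_name
  else
    let cut := removeNsGo t (t.length + 1) i 0
    String.ofList ("/* ".toList ++ PySem.List.slice t none (some cut)
      ++ " */ ".toList ++ PySem.List.slice t (some cut) none)

-- ===== PRECONDITION & SPEC =====
def Spec_remove_ns (class_name : String) (out : String) : Prop := out = remove_ns_alt class_name
instance (class_name : String) (out : String) : Decidable (Spec_remove_ns class_name out) := by unfold Spec_remove_ns; infer_instance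

-- ===== CLAIM (what is proved, stated in full; the proofs are below) =====
def Claim_equal_remove_ns : Prop := ∀ (class_name : String), Dom_remove_ns class_name → Spec_remove_ns class_name (remove_ns class_name)

-- ===== LEMMAS AND PROOFS =====

def nsSep : List Char := [':', ':']

lemma find_nil_sep : PySem.Chars.find [] nsSep = -1 := by decide

lemma sep_len_le {t : List Char} (h : nsSep <+: t) : 2 ≤ t.length := by
  have := h.length_le; simpa [nsSep] using this

lemma find_facts (t : List Char) (h : ¬ PySem.Chars.find t nsSep = -1) :
    0 ≤ PySem.Chars.find t nsSep ∧ (PySem.Chars.find t nsSep).toNat + 2 ≤ t.length := by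
  have h0 : 0 ≤ PySem.Chars.find t nsSep := by
    have := PySem.Chars.neg_one_le_find t nsSep; omega
  have hpre := (PySem.Chars.find_spec (s := t) (sub := nsSep) h0).1
  have hlen := sep_len_le hpre
  rw [List.length_drop] at hlen
  exact ⟨h0, by omega⟩

-- reference splitter: split at the FIRST occurrence, recurse on the remainder
def fsplit (t : List Char) : List (List Char) :=
  let j := PySem.Chars.find t nsSep
  if h : j = -1 then [t]
  else t.take j.toNat :: fsplit (t.drop (j.toNat + 2))
termination_by t.length
decreasing_by
  obtain ⟨h0, hle⟩ := find_facts t h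
  rw [List.length_drop]; omega

-- cut offset of the last token: total length of the prefix tokens with their '::'
def gcut (t : List Char) : Nat :=
  let j := PySem.Chars.find t nsSep
  if h : j = -1 then 0
  else j.toNat + 2 + gcut (t.drop (j.toNat + 2))
termination_by t.length
decreasing_by
  obtain ⟨h0, hle⟩ := find_facts t h
  rw [List.length_drop]; omega

lemma prefix_drop_infix {sub t : List Char} {j : Nat} (h : sub <+: t.drop j) : sub <:+: t := by
  obtain ⟨r, hr⟩ := h
  exact ⟨t.take j, r, by rw [List.append_assoc, hr, List.take_append_drop]⟩

-- find = k if there is an occurrence at k and none before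
lemma find_eq_of (s sub : List Char) (k : Nat)
    (h1 : sub <+: s.drop k) (h2 : ∀ i < k, ¬ sub <+: s.drop i) :
    PySem.Chars.find s sub = (k : Int) := by
  have hin : PySem.Chars.isIn sub s = true :=
    (PySem.Chars.exists_prefix_drop_iff_isIn (s := s) (sub := sub)).1 ⟨k, h1⟩
  have hinf : sub <:+: s := (PySem.Chars.isIn_iff_infix (sub := sub) (s := s)).1 hin
  have h0 : 0 ≤ PySem.Chars.find s sub := (PySem.Chars.find_nonneg_iff (s := s) (sub := sub)).2 hinf
  obtain ⟨hp, hmin⟩ := PySem.Chars.find_spec (s := s) (sub := sub) h0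
  rcases lt_trichotomy ((PySem.Chars.find s sub).toNat) k with h | h | h
  · exact absurd hp (h2 _ h)
  · omega
  · exact absurd h1 (hmin k h)

lemma find_of_prefix (s : List Char) (h : nsSep <+: s) : PySem.Chars.find s nsSep = 0 := by
  have := find_eq_of s nsSep 0 (by simpa using h) (by omega)
  simpa using this

lemma find_cons_not_prefix (c : Char) (rest : List Char) (h : ¬ nsSep <+: (c :: rest)) :
    PySem.Chars.find (c :: rest) nsSep =
      (if PySem.Chars.find rest nsSep = -1 then -1 else 1 + PySem.Chars.find rest nsSep) := by
  by_cases hr : PySem.Chars.find rest nsSep = -1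
  · rw [if_pos hr, PySem.Chars.find_eq_neg_one_iff]
    intro hinf
    have hin : PySem.Chars.isIn nsSep (c :: rest) = true :=
      (PySem.Chars.isIn_iff_infix (sub := nsSep) (s := c :: rest)).2 hinf
    obtain ⟨j, hj⟩ :=
      (PySem.Chars.exists_prefix_drop_iff_isIn (s := c :: rest) (sub := nsSep)).2 hin
    rcases j with _ | j
    · exact h (by simpa using hj)
    · have hj' : nsSep <+: rest.drop j := by simpa using hj
      rw [PySem.Chars.find_eq_neg_one_iff] at hr
      exact hr (prefix_drop_infix hj')
  · rw [if_neg hr]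
    obtain ⟨h0, hle⟩ := find_facts rest hr
    obtain ⟨hp, hmin⟩ := PySem.Chars.find_spec (s := rest) (sub := nsSep) h0
    have hres : PySem.Chars.find (c :: rest) nsSep = (((PySem.Chars.find rest nsSep).toNat + 1 : Nat) : Int) := by
      apply find_eq_of
      · simpa using hp
      · intro i hi
        rcases i with _ | m
        · simpa using h
        · have hm : m < (PySem.Chars.find rest nsSep).toNat := by omega
          simpa using hmin m hm
    rw [hres]; omega

lemma fsplit_ne_nil (t : List Char) : fsplit t ≠ [] := by
  rw [fsplit]
  split <;> simp

-- prepend a prefix onto the first piece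
def pfirst (p : List Char) : List (List Char) → List (List Char)
  | [] => [p]
  | u :: us => (p ++ u) :: us

lemma pfirst_nil_of_ne (xs : List (List Char)) (h : xs ≠ []) : pfirst [] xs = xs := by
  cases xs with
  | nil => exact absurd rfl h
  | cons u us => simp [pfirst]

-- splitOn.go step equations
lemma go_nil (fuel : Nat) (cur : List Char) (acc : List (List Char)) :
    PySem.Chars.splitOn.go nsSep (fuel + 1) [] cur acc = (cur.reverse :: acc).reverse := by
  rw [PySem.Chars.splitOn.go] <;> omega

lemma go_pos (fuel : Nat) (c : Char) (rest cur : List Char) (acc : List (List Char))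
    (hp : nsSep.isPrefixOf (c :: rest) = true) :
    PySem.Chars.splitOn.go nsSep (fuel + 1) (c :: rest) cur acc =
      PySem.Chars.splitOn.go nsSep fuel ((c :: rest).drop nsSep.length) [] (cur.reverse :: acc) := by
  rw [PySem.Chars.splitOn.go] <;> simp [hp]

lemma go_neg (fuel : Nat) (c : Char) (rest cur : List Char) (acc : List (List Char))
    (hp : ¬ nsSep.isPrefixOf (c :: rest) = true) :
    PySem.Chars.splitOn.go nsSep (fuel + 1) (c :: rest) cur acc =
      PySem.Chars.splitOn.go nsSep fuel rest (c :: cur) acc := by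
  rw [PySem.Chars.splitOn.go] <;> simp [hp]

-- splitOn.go computes fsplit
lemma go_spec (fuel : Nat) : ∀ (l cur : List Char) (acc : List (List Char)),
    l.length < fuel →
    PySem.Chars.splitOn.go nsSep fuel l cur acc = acc.reverse ++ pfirst cur.reverse (fsplit l) := by
  induction fuel with
  | zero => intro l cur acc h; omega
  | succ fuel ih =>
    intro l cur acc h
    match l with
    | [] =>
      rw [go_nil, fsplit]
      simp [find_nil_sep, pfirst]
    | c :: rest =>
      by_cases hp : nsSep.isPrefixOf (c :: rest) = true
      · have hpre : nsSep <+: (c :: rest) := List.isPrefixOf_iff_prefix.1 hp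
        have hlen2 := sep_len_le hpre
        rw [go_pos fuel c rest cur acc hp,
          ih _ _ _ (by simp only [List.length_drop, List.length_cons, nsSep] at *; omega)]
        have hfind : PySem.Chars.find (c :: rest) nsSep = 0 := find_of_prefix _ hpre
        conv_rhs => rw [fsplit]
        rw [dif_neg (by rw [hfind]; decide)]
        rw [hfind]
        have hd : ((0 : Int)).toNat + 2 = nsSep.length := by simp [nsSep]
        rw [hd] at *
        cases hfs : fsplit ((c :: rest).drop nsSep.length) with
        | nil => exact absurd hfs (fsplit_ne_nil _)
        | cons u us => simp [pfirst]
      · have hnpre : ¬ nsSep <+: (c :: rest) := fun hx => hp (List.isPrefixOf_iff_prefix.2 hx)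
        rw [go_neg fuel c rest cur acc hp,
          ih _ _ _ (by simp at h ⊢; omega)]
        have hfind := find_cons_not_prefix c rest hnpre
        by_cases hr : PySem.Chars.find rest nsSep = -1
        · rw [if_pos hr] at hfind
          conv_rhs => rw [fsplit]
          rw [dif_pos hfind]
          conv_lhs => rw [fsplit]
          rw [dif_pos hr]
          simp [pfirst]
        · rw [if_neg hr] at hfind
          obtain ⟨h0, hle⟩ := find_facts rest hr
          conv_rhs => rw [fsplit]
          rw [dif_neg (by rw [hfind]; omega)]
          conv_lhs => rw [fsplit]
          rw [dif_neg hr]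
          have htn : (PySem.Chars.find (c :: rest) nsSep).toNat
              = (PySem.Chars.find rest nsSep).toNat + 1 := by rw [hfind]; omega
          rw [htn]
          rw [List.take_succ_cons, List.drop_succ_cons]
          simp [pfirst]

-- splitOn agrees with fsplit
lemma splitOn_eq_fsplit (t : List Char) : PySem.Chars.splitOn t nsSep = fsplit t := by
  have h : PySem.Chars.splitOn t nsSep = PySem.Chars.splitOn.go nsSep (t.length + 1) t [] [] := rfl
  rw [h, go_spec (t.length + 1) t [] [] (by omega)]
  simpa using pfirst_nil_of_ne _ (fsplit_ne_nil t)

-- A's reconstruction loop builds the concatenation of the first m tokens, each with '::'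
lemma foldA (ts : List (List Char)) : ∀ (m : Nat) (acc : List Char), m ≤ ts.length →
    (PySem.List.pyRange 0 (m : Int) 1).foldl
      (fun a i => a ++ PySem.List.pyGetD ts i [] ++ [':', ':']) acc
    = acc ++ (ts.take m).flatMap (· ++ nsSep) := by
  intro m
  induction m with
  | zero => intro acc h; simp [PySem.List.pyRange_one_eq_nil]
  | succ m ih =>
    intro acc h
    have hcast : ((m + 1 : Nat) : Int) = (m : Int) + 1 := by push_cast; ring
    rw [hcast, PySem.List.pyRange_one_succ_right (by omega), List.foldl_append,
      ih acc (by omega)]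
    have hm : m < ts.length := by omega
    have hget : PySem.List.pyGetD ts (m : Int) [] = ts[m] := by
      rw [PySem.List.pyGetD_natCast]
      exact List.getD_eq_getElem ts [] hm
    simp only [List.foldl_cons, List.foldl_nil, hget]
    have htk : List.take (m + 1) ts = List.take m ts ++ [ts[m]] := by
      rw [List.take_add_one, List.getElem?_eq_getElem hm, Option.toList_some]
    rw [htk, List.flatMap_append, List.flatMap_cons, List.flatMap_nil]
    simp [nsSep]

-- joint characterization: the prefix tokens joined with '::' are t.take (gcut t),
-- and the last token is t.drop (gcut t)
lemma fg (t : List Char) :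
    ((fsplit t).dropLast).flatMap (· ++ nsSep) = t.take (gcut t) ∧
    (fsplit t).getLast? = some (t.drop (gcut t)) := by
  by_cases h : PySem.Chars.find t nsSep = -1
  · rw [fsplit, dif_pos h, gcut, dif_pos h]
    simp
  · obtain ⟨h0, hle⟩ := find_facts t h
    have hrec := fg (t.drop ((PySem.Chars.find t nsSep).toNat + 2))
    rw [fsplit, dif_neg h, gcut, dif_neg h]
    set j := (PySem.Chars.find t nsSep).toNat with hj
    set g := gcut (t.drop (j + 2)) with hg
    have hp := (PySem.Chars.find_spec (s := t) (sub := nsSep) h0).1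
    have hsep : (t.drop j).take 2 = nsSep := by
      obtain ⟨r, hrr⟩ := hp
      rw [← hrr]; simp [nsSep]
    have h1 : t.take (j + 2 + g) = t.take (j + 2) ++ (t.drop (j + 2)).take g :=
      List.take_add ..
    have h2 : t.take (j + 2) = t.take j ++ nsSep := by
      rw [show j + 2 = j + 2 from rfl, List.take_add, hsep]
    cases hfs : fsplit (t.drop (j + 2)) with
    | nil => exact absurd hfs (fsplit_ne_nil _)
    | cons u us =>
      rw [hfs] at hrec
      constructor
      · have hdl : (t.take j :: u :: us).dropLast = t.take j :: (u :: us).dropLast := rfl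
        rw [hdl, List.flatMap_cons, hrec.1, h1, h2, List.append_assoc]
      · have hgl : (t.take j :: u :: us).getLast? = (u :: us).getLast? := rfl
        rw [hgl, hrec.2, List.drop_drop]
termination_by t.length
decreasing_by
  rw [List.length_drop]; omega

-- B's while loop lands on gcut
lemma bGo_spec (t : List Char) : ∀ (fuel : Nat) (c : Nat), c ≤ t.length → t.length - c < fuel →
    removeNsGo t fuel (PySem.Chars.findFrom t [':', ':'] (c : Int) none) (c : Int)
      = ((c + gcut (t.drop c) : Nat) : Int) := by
  intro fuel
  induction fuel with
  | zero => intro c h1 h2; omega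
  | succ fuel ih =>
    intro c h1 h2
    have hff := PySem.Chars.findFrom_natCast t nsSep c h1
    by_cases hr : PySem.Chars.find (t.drop c) nsSep = -1
    · have hi : PySem.Chars.findFrom t [':', ':'] (c : Int) none = -1 := by
        rw [show ([':', ':'] : List Char) = nsSep from rfl, hff, if_pos hr]
      rw [hi]
      simp only [removeNsGo, if_pos rfl]
      rw [gcut, dif_pos hr]
      simp
    · obtain ⟨h0, hle⟩ := find_facts (t.drop c) hr
      rw [List.length_drop] at hle
      set j := (PySem.Chars.find (t.drop c) nsSep).toNat with hjdef
      have hi : PySem.Chars.findFrom t [':', ':'] (c : Int) none = ((c + j : Nat) : Int) := by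
        rw [show ([':', ':'] : List Char) = nsSep from rfl, hff, if_neg hr]
        push_cast; omega
      rw [hi]
      have hne : ¬ (((c + j : Nat) : Int) = -1) := by push_cast; omega
      simp only [removeNsGo, if_neg hne]
      have hstep : (((c + j : Nat) : Int) + 2) = ((c + j + 2 : Nat) : Int) := by push_cast; ring
      rw [hstep, ih (c + j + 2) (by omega) (by omega)]
      have hgc : gcut (t.drop c) = j + 2 + gcut (t.drop (c + j + 2)) := by
        rw [gcut, dif_neg hr, ← hjdef]
        congr 1
        rw [List.drop_drop]
        congr 2
      rw [hgc]
      push_cast; ring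

-- the two ports agree on every string
lemma main_eq (s : String) : remove_ns s = remove_ns_alt s := by
  simp only [remove_ns, remove_ns_alt]
  rw [show (PySem.Chars.splitOn s.toList [':', ':']) = fsplit s.toList from splitOn_eq_fsplit _]
  by_cases hf : PySem.Chars.find s.toList nsSep = -1
  · have hts : fsplit s.toList = [s.toList] := by rw [fsplit, dif_pos hf]
    rw [hts]
    rw [show (PySem.Chars.find s.toList [':', ':']) = -1 from hf]
    simp
  · have hne := fsplit_ne_nil (s.toList.drop ((PySem.Chars.find s.toList nsSep).toNat + 2))
    have h2le : 2 ≤ (fsplit s.toList).length := by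
      rw [fsplit, dif_neg hf]
      have := List.length_pos_of_ne_nil hne
      simp only [List.length_cons]
      omega
    set t := s.toList with ht
    set ts := fsplit t with hts
    set n := ts.length with hn
    rw [if_pos (by omega)]
    rw [if_neg (show ¬ (PySem.Chars.find t [':', ':'] = -1) from hf)]
    -- A side: fold = "/* " ++ take (gcut t), last token = drop (gcut t)
    have hcast : ((n : Int) - 1) = (((n - 1 : Nat)) : Int) := by omega
    rw [hcast]
    rw [foldA ts (n - 1) _ (by omega)]
    have hdl : ts.take (n - 1) = ts.dropLast := by rw [List.dropLast_eq_take, ← hn]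
    obtain ⟨hfg1, hfg2⟩ := fg t
    rw [hdl, hfg1]
    have hlast : PySem.List.pyGetD ts (((n - 1 : Nat)) : Int) [] = t.drop (gcut t) := by
      rw [PySem.List.pyGetD_natCast]
      have h1 : ts.getLast? = ts[n - 1]? := by rw [List.getLast?_eq_getElem?, ← hn]
      rw [hfg2] at h1
      have h2 : ts[n - 1]? = some (t.drop (gcut t)) := h1.symm
      simp [List.getD, h2]
    rw [hlast]
    -- B side: cut = gcut t
    have hcut : removeNsGo t (t.length + 1) (PySem.Chars.find t [':', ':']) 0
        = ((gcut t : Nat) : Int) := by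
      have h0 : PySem.Chars.find t [':', ':'] = PySem.Chars.findFrom t [':', ':'] ((0 : Nat) : Int) none := by
        rw [show ((0 : Nat) : Int) = (0 : Int) from rfl, PySem.Chars.findFrom_zero]
      rw [h0, show ((0 : Int)) = ((0 : Nat) : Int) from rfl]
      rw [bGo_spec t (t.length + 1) 0 (by omega) (by omega)]
      simp
    rw [hcut]
    rw [PySem.List.slice_to _ (Int.natCast_nonneg _), PySem.List.slice_from _ (Int.natCast_nonneg _)]
    simp

-- ===== VERDICT (by name: the statement is the Claim_ definition above) =====
theorem remove_ns_spec : Claim_equal_remove_ns := by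
  intro class_name _
  unfold Spec_remove_ns
  exact main_eq class_name
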